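-- pv_equiv track=rewrite | github.com/mahirlabibdihan/LLMSniffer | data/whodunit/train/1_SUBLD_0.py | findsubtract
-- ===== SOURCE A (Python) =====
-- def findsubtract(num):
--     n = num
--     strn = str(n)
--     count = 0
--     while n > 0:
--         fd = int(strn[0])
--         p = len(strn) - 1
--         if p == 0:
--             n -= fd
--             strn = str(n)
--             count += 1
--         else:
--             n1 = n - fd * 10**p
--             n2 = n1//fd+1
--             count += n2
--             n -= n2 * fd
--             strn = str(n)
--     return count + 1
-- ===== SOURCE B (Python) =====
-- def findsubtract(num):
--     # Band-chain walk: keep a symbolic state (p, d, r) = (magnitude, leading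
--     # digit, offset above the band floor d*10**p) instead of n itself, and step
--     # through the deterministic chain of leading-digit bands with divmod
--     # transitions; nothing is ever re-derived from the running value.
--     if num <= 0:
--         return 1
--     s = str(num)
--     p = len(s) - 1
--     d = int(s[0])
--     r = num - d * 10 ** p
--     count = 0
--     while p > 0:
--         q, r = divmod(r, d)
--         count += q + 1                 # steps spent inside band (d, p)
--         if d > 1:
--             r += 10 ** p - d           # lands in band (d-1, p)
--             d -= 1
--         else:
--             p -= 1                     # 10**p - 1: all nines, band (9, p-1)
--             r = 10 ** p - 1
--             d = 9
--     count += 1                         # the remaining single digit -> 0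
--     return count + 1
-- ===== Notes on version B (the rewrite author's own statement) =====
-- stated objective: alternative
-- what changed: B converts num once into a symbolic band descriptor (magnitude p, leading digit d, offset r) and walks the deterministic chain of leading-digit bands with divmod transitions on that descriptor, never re-deriving anything from the running value; A instead keeps the running value n and re-derives str(n), the leading digit and a batch jump from it on every loop turn.
import Mathlib
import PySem

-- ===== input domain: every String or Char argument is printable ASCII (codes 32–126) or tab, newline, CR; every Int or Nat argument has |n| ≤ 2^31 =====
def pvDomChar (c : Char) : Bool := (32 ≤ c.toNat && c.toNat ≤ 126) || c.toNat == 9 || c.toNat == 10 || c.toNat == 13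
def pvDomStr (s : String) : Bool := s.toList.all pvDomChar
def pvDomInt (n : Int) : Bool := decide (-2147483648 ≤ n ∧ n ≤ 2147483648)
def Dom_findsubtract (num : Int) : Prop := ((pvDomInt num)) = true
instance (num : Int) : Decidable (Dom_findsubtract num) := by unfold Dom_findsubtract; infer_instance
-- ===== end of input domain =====

-- B walks the deterministic chain of leading-digit bands on a symbolic
-- descriptor (p, d, r) computed once from str(num), instead of A's loop that
-- re-derives str(n) and a batch jump from the running value; objective: alternative.

-- ===== PORT A =====
-- The lemmas before pvLoopA characterise str(n) (PySem.Int.toChars) for n > 0; the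
-- port's decreasing_by cites pvA_facts, so they must precede the port.
theorem pvToDigitsCore_eq (fuel : Nat) : ∀ (n : Nat) (ds : List Char), n ≠ 0 → n < fuel →
    Nat.toDigitsCore 10 fuel n ds = ((Nat.digits 10 n).map Nat.digitChar).reverse ++ ds := by
  induction fuel with
  | zero => intro n ds h1 h2; omega
  | succ fuel ih =>
    intro n ds h1 h2
    rw [Nat.digits_def' (by norm_num : 1 < 10) (by omega : 0 < n)]
    by_cases h : n / 10 = 0
    · simp [Nat.toDigitsCore, h]
    · have hlt : n / 10 < fuel := by
        have := Nat.div_lt_self (by omega : 0 < n) (by norm_num : 1 < 10)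
        omega
      simp only [Nat.toDigitsCore, h, if_false]
      rw [ih (n / 10) _ h hlt, Nat.digits_def' (by norm_num : 1 < 10) (by omega : 0 < n / 10)]
      simp

theorem pvToChars_pos (n : Int) (h : 0 < n) :
    PySem.Int.toChars n = ((Nat.digits 10 n.toNat).map Nat.digitChar).reverse := by
  have : ¬ n < 0 := by omega
  simp only [PySem.Int.toChars, this, if_false]
  rw [Nat.toDigits, pvToDigitsCore_eq (n.toNat + 1) n.toNat [] (by omega) (by omega)]
  simp

theorem pvDigits_getLast_eq (m : Nat) (hm : m ≠ 0) (h : Nat.digits 10 m ≠ []) :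
    (Nat.digits 10 m).getLast h = m / 10 ^ Nat.log 10 m := by
  induction m using Nat.strong_induction_on with
  | _ m ih =>
    by_cases hlt : m < 10
    · have hd : Nat.digits 10 m = [m] := by
        rw [Nat.digits_def' (by norm_num : 1 < 10) (by omega : 0 < m)]
        rw [Nat.div_eq_of_lt hlt, Nat.mod_eq_of_lt hlt]; simp
      have hl : Nat.log 10 m = 0 := Nat.log_eq_of_pow_le_of_lt_pow (by rw [pow_zero]; omega) (by rw [zero_add, pow_one]; exact hlt)
      simp [hd, hl]
    · have h10 : 10 ≤ m := by omega
      have hq : Nat.digits 10 (m / 10) ≠ [] := by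
        rw [Nat.digits_ne_nil_iff_ne_zero]
        omega
      rw [Nat.digits_getLast m (by norm_num) h hq,
        ih (m / 10) (Nat.div_lt_self (by omega) (by norm_num)) (by omega) hq]
      have hlog : Nat.log 10 m = Nat.log 10 (m / 10) + 1 := by
        rw [Nat.log_div_base]
        have : 0 < Nat.log 10 m := Nat.log_pos (by norm_num) h10
        omega
      rw [hlog, pow_succ, Nat.div_div_eq_div_mul]
      ring_nf

theorem pvToChars_head (n : Int) (h : 0 < n) :
    (PySem.Int.toChars n).head? = some (Nat.digitChar (n.toNat / 10 ^ Nat.log 10 n.toNat)) := by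
  have hm : n.toNat ≠ 0 := by omega
  have hne : Nat.digits 10 n.toNat ≠ [] := Nat.digits_ne_nil_iff_ne_zero.mpr hm
  rw [pvToChars_pos n h, List.head?_reverse, List.getLast?_map,
    List.getLast?_eq_some_getLast hne, pvDigits_getLast_eq _ hm hne]
  rfl

theorem pvToChars_length (n : Int) (h : 0 < n) :
    (PySem.Int.toChars n).length = Nat.log 10 n.toNat + 1 := by
  rw [pvToChars_pos n h]
  simp [Nat.length_digits 10 n.toNat (by norm_num) (by omega)]

theorem pvOfChars_digitChar (L : Nat) (h1 : 1 ≤ L) (h9 : L ≤ 9) :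
    PySem.Int.ofChars? [Nat.digitChar L] = some (L : Int) := by
  interval_cases L <;> decide

-- fd = int(strn[0]) and p = len(strn) - 1, where strn = str(n) (as its character
-- list; exact by PySem.Int.toList_toStr). The .getD 0 default is unreachable for
-- n > 0, where strn[0] is a nonzero digit (pvA_facts).
def pvFdA (n : Int) : Int := (PySem.Int.ofChars? ((PySem.Int.toChars n).take 1)).getD 0
def pvPA (n : Int) : Int := ((PySem.Int.toChars n).length : Int) - 1

-- The values A reads off str(n) at each loop head, arithmetically (cited by
-- pvLoopA's decreasing_by).
theorem pvA_facts (n : Int) (h : 0 < n) :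
    1 ≤ pvFdA n ∧ pvFdA n * 10 ^ (pvPA n).toNat ≤ n ∧ n < (pvFdA n + 1) * 10 ^ (pvPA n).toNat ∧
      (pvPA n).toNat = Nat.log 10 n.toNat ∧ 0 ≤ pvPA n := by
  have hm : n.toNat ≠ 0 := by omega
  have hppos : 0 < 10 ^ Nat.log 10 n.toNat := pow_pos (by norm_num) _
  have hlo : 10 ^ Nat.log 10 n.toNat ≤ n.toNat := Nat.pow_log_le_self 10 hm
  have hhi : n.toNat < 10 ^ (Nat.log 10 n.toNat + 1) := Nat.lt_pow_succ_log_self (by norm_num) _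
  set L := n.toNat / 10 ^ Nat.log 10 n.toNat with hLdef
  have hL1 : 1 ≤ L := (Nat.one_le_div_iff hppos).mpr hlo
  have hL9 : L ≤ 9 := by
    have : L < 10 := by
      rw [hLdef, Nat.div_lt_iff_lt_mul hppos]
      calc n.toNat < 10 ^ (Nat.log 10 n.toNat + 1) := hhi
        _ = 10 * 10 ^ Nat.log 10 n.toNat := by ring
    omega
  have htake : (PySem.Int.toChars n).take 1 = [Nat.digitChar L] := by
    have hh := pvToChars_head n h
    cases hc : PySem.Int.toChars n with
    | nil => simp [hc] at hh
    | cons c cs => simp [hc] at hh ⊢; exact hh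
  have hfd : pvFdA n = (L : Int) := by
    rw [pvFdA, htake, pvOfChars_digitChar L hL1 hL9]; rfl
  have hp : pvPA n = (Nat.log 10 n.toNat : Int) := by
    rw [pvPA, pvToChars_length n h]; push_cast; ring
  have hptn : (pvPA n).toNat = Nat.log 10 n.toNat := by omega
  refine ⟨by omega, ?_, ?_, hptn, by omega⟩
  · rw [hfd, hptn]
    have h1 : L * 10 ^ Nat.log 10 n.toNat ≤ n.toNat := Nat.div_mul_le_self _ _
    have h2 : ((L : Int)) * 10 ^ Nat.log 10 n.toNat ≤ (n.toNat : Int) := by exact_mod_cast h1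
    omega
  · rw [hfd, hptn]
    have h1 : n.toNat < (L + 1) * 10 ^ Nat.log 10 n.toNat := by
      have ha := Nat.div_add_mod n.toNat (10 ^ Nat.log 10 n.toNat)
      have hb := Nat.mod_lt n.toNat hppos
      nlinarith [Nat.div_mul_le_self n.toNat (10 ^ Nat.log 10 n.toNat)]
    have h2 : (n.toNat : Int) < ((L : Int) + 1) * 10 ^ Nat.log 10 n.toNat := by exact_mod_cast h1
    omega

-- A's while-loop; strn = str(n) is recomputed at the loop head (the Python keeps
-- strn equal to str(n) there by reassigning it after every update of n).
def pvLoopA (n count : Int) : Int :=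
  if h : 0 < n then
    let fd := pvFdA n
    let p := pvPA n
    if p = 0 then pvLoopA (n - fd) (count + 1)
    else
      let n1 := n - fd * 10 ^ p.toNat   -- 10**p; p ≥ 1 in this branch
      let n2 := PySem.Int.floordiv n1 fd + 1
      pvLoopA (n - n2 * fd) (count + n2)
  else count
termination_by n.toNat
decreasing_by
  · obtain ⟨h1, h2, h3, h4, h5⟩ := pvA_facts n h
    omega
  · obtain ⟨h1, h2, h3, h4, h5⟩ := pvA_facts n h
    have hq0 : 0 ≤ PySem.Int.floordiv (n - pvFdA n * 10 ^ (pvPA n).toNat) (pvFdA n) :=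
      (PySem.Int.le_floordiv_iff_mul_le (by omega)).mpr (by nlinarith)
    rw [Int.toNat_lt_toNat h]
    nlinarith

def findsubtract (num : Int) : Int := pvLoopA num 0 + 1

-- ===== PORT B =====
-- The while-loop on the band descriptor (p, d, r): q, r = divmod(r, d);
-- count += q + 1; then move to band (d-1, p) or, from d = 1, to (9, p-1).
def pvLoopD (p d r count : Int) : Int :=
  if hp : 0 < p then
    let q := PySem.Int.floordiv r d
    let r1 := PySem.Int.mod r d
    if 1 < d then pvLoopD p (d - 1) (r1 + (10 ^ p.toNat - d)) (count + (q + 1))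
    else pvLoopD (p - 1) 9 (10 ^ (p - 1).toNat - 1) (count + (q + 1))
  else count
termination_by 10 * p.toNat + d.toNat
decreasing_by
  · rename_i hd; omega
  · omega

-- s = str(num); p = len(s) - 1; d = int(s[0]); r = num - d * 10**p; then the
-- band walk, the final single-digit step (count += 1) and the trailing + 1.
def findsubtract_alt (num : Int) : Int :=
  if num ≤ 0 then 1
  else
    let s := PySem.Int.toChars num
    let p : Int := (s.length : Int) - 1
    let d : Int := (PySem.Int.ofChars? (s.take 1)).getD 0
    let r := num - d * 10 ^ p.toNat
    pvLoopD p d r 0 + 1 + 1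

-- ===== PRECONDITION & SPEC =====
def Spec_findsubtract (num : Int) (out : Int) : Prop := out = findsubtract_alt num
instance (num : Int) (out : Int) : Decidable (Spec_findsubtract num out) := by unfold Spec_findsubtract; infer_instance

-- ===== CLAIM (what is proved, stated in full; the proofs are below) =====
def Claim_equal_findsubtract : Prop := ∀ (num : Int), Dom_findsubtract num → Spec_findsubtract num (findsubtract num)

-- ===== LEMMAS AND PROOFS =====
theorem pvFdA_le9 (n : Int) (h : 0 < n) : pvFdA n ≤ 9 := by
  obtain ⟨h1, h2, h3, h4, h5⟩ := pvA_facts n h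
  have hhi : n.toNat < 10 ^ (Nat.log 10 n.toNat + 1) := Nat.lt_pow_succ_log_self (by norm_num) _
  have hhi' : (n : Int) < ((10:Int)) ^ (Nat.log 10 n.toNat + 1) := by
    have hc : ((n.toNat : Int)) < ((10 ^ (Nat.log 10 n.toNat + 1) : Nat) : Int) := by
      exact_mod_cast hhi
    push_cast at hc
    omega
  have hpow : ((10:Int)) ^ (Nat.log 10 n.toNat + 1) = 10 * 10 ^ (pvPA n).toNat := by
    rw [h4]; ring
  have hPpos : (0:Int) < 10 ^ (pvPA n).toNat := pow_pos (by norm_num) _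
  nlinarith

-- On a band [d*10^p, (d+1)*10^p) the string A reads has leading digit d and
-- length p + 1.
theorem pvBand_facts (m d : Int) (p : Nat) (hd1 : 1 ≤ d) (hd9 : d ≤ 9)
    (hlo : d * 10 ^ p ≤ m) (hhi : m < (d + 1) * 10 ^ p) :
    pvFdA m = d ∧ pvPA m = (p : Int) := by
  have hPpos : (0:Int) < 10 ^ p := pow_pos (by norm_num) _
  have hmpos : 0 < m := by nlinarith
  obtain ⟨h1, h2, h3, h4, h5⟩ := pvA_facts m hmpos
  have hlog : Nat.log 10 m.toNat = p := by
    apply Nat.log_eq_of_pow_le_of_lt_pow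
    · have : ((10:Int)) ^ p ≤ m := by nlinarith
      have h10 : ((10:Nat) ^ p : Int) ≤ m := by push_cast; exact this
      omega
    · have : m < ((10:Int)) ^ (p + 1) := by
        have hd10 : ((d:Int) + 1) * 10 ^ p ≤ 10 * 10 ^ p := by nlinarith
        calc m < (d + 1) * 10 ^ p := hhi
          _ ≤ 10 * 10 ^ p := hd10
          _ = 10 ^ (p + 1) := by ring
      have h10 : m < ((10:Nat) ^ (p + 1) : Int) := by push_cast; exact this
      omega
  rw [hlog] at h4
  have hpa : pvPA m = (p : Int) := by omega
  rw [h4] at h2 h3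
  have ha : pvFdA m < d + 1 := lt_of_mul_lt_mul_right (by omega) (le_of_lt hPpos)
  have hb : d < pvFdA m + 1 := lt_of_mul_lt_mul_right (by omega) (le_of_lt hPpos)
  exact ⟨by omega, hpa⟩

-- A's simulation from the value d*10^p + r equals B's walk from the band
-- descriptor (p, d, r), plus the one final single-digit step.
theorem pvAD (k : Nat) : ∀ (p d r count : Int), 0 ≤ p → 1 ≤ d → d ≤ 9 → 0 ≤ r →
    r < 10 ^ p.toNat → (p = 0 → r = 0) → 10 * p.toNat + d.toNat ≤ k →
    pvLoopA (d * 10 ^ p.toNat + r) count = pvLoopD p d r count + 1 := by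
  induction k with
  | zero => intro p d r count hp0 hd1 _ _ _ _ hk; exfalso; omega
  | succ k ih =>
    intro p d r count hp0 hd1 hd9 hr0 hrlt hpz hk
    have hPpos : (0:Int) < 10 ^ p.toNat := pow_pos (by norm_num) _
    have hnpos : 0 < d * 10 ^ p.toNat + r := by nlinarith
    obtain ⟨hfd, hpa⟩ := pvBand_facts (d * 10 ^ p.toNat + r) d p.toNat hd1 hd9
      (by omega) (by nlinarith)
    rw [show ((p.toNat : Int)) = p from by omega] at hpa
    rw [pvLoopA.eq_def]
    simp only [hnpos, dif_pos, hfd, hpa]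
    by_cases hp : p = 0
    · -- single digit: value is d, one step on both sides
      subst hp
      have hr : r = 0 := hpz rfl
      subst hr
      norm_num
      rw [pvLoopA.eq_def]
      norm_num
      rw [pvLoopD.eq_def]
      norm_num
    · have hppos : 0 < p := by omega
      have hpne : ((p:Int)) ≠ 0 := by omega
      rw [if_neg hpne]
      have hdm := PySem.Int.floordiv_mul_add_mod r d
      have hmod : PySem.Int.mod r d = r % d := PySem.Int.mod_eq_emod_of_pos (by omega)
      have hm0 : 0 ≤ PySem.Int.mod r d := by rw [hmod]; exact Int.emod_nonneg r (by omega)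
      have hmlt : PySem.Int.mod r d < d := by rw [hmod]; exact Int.emod_lt_of_pos r (by omega)
      have hsub : d * 10 ^ p.toNat + r - d * 10 ^ p.toNat = r := by ring
      rw [hsub]
      have hP10 : (10:Int) ≤ 10 ^ p.toNat := by
        calc (10:Int) = 10 ^ 1 := by norm_num
          _ ≤ 10 ^ p.toNat := pow_le_pow_right₀ (by norm_num) (by omega)
      by_cases hd : 1 < d
      · -- move to band (d - 1, p)
        have hval : d * 10 ^ p.toNat + r - (PySem.Int.floordiv r d + 1) * d
            = (d - 1) * 10 ^ p.toNat + (PySem.Int.mod r d + (10 ^ p.toNat - d)) := by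
          nlinarith [hdm]
        rw [hval, ih p (d - 1) (PySem.Int.mod r d + (10 ^ p.toNat - d))
          (count + (PySem.Int.floordiv r d + 1)) hp0 (by omega) (by omega) (by omega)
          (by omega) (by omega) (by omega)]
        conv_rhs => rw [pvLoopD.eq_def]
        simp only [hppos, dif_pos]
        rw [if_pos hd]
      · -- d = 1: land on the all-nines value 10^p - 1, band (9, p - 1)
        have hd1' : d = 1 := by omega
        subst hd1'
        have hmz : PySem.Int.mod r 1 = 0 := by omega
        have hqr : PySem.Int.floordiv r 1 = r := by omega
        have hpt : p.toNat = (p - 1).toNat + 1 := by omega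
        have hsplit : (10:Int) ^ p.toNat = 10 * 10 ^ (p - 1).toNat := by
          rw [hpt]; ring
        have hP1pos : (0:Int) < 10 ^ (p - 1).toNat := pow_pos (by norm_num) _
        have hval : 1 * 10 ^ p.toNat + r - (PySem.Int.floordiv r 1 + 1) * 1
            = 9 * 10 ^ (p - 1).toNat + (10 ^ (p - 1).toNat - 1) := by
          rw [hqr, hsplit]; ring
        rw [hval, ih (p - 1) 9 (10 ^ (p - 1).toNat - 1)
          (count + (PySem.Int.floordiv r 1 + 1)) (by omega) (by norm_num) (by norm_num)
          (by omega) (by omega) ?_ (by omega)]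
        · conv_rhs => rw [pvLoopD.eq_def]
          simp only [hppos, dif_pos]
          norm_num
        · intro hp1
          have : (p - 1).toNat = 0 := by omega
          rw [this]; norm_num

-- ===== VERDICT (by name: the statement is the Claim_ definition above) =====
theorem findsubtract_spec : Claim_equal_findsubtract := by
  intro num _
  unfold Spec_findsubtract findsubtract findsubtract_alt
  by_cases h0 : num ≤ 0
  · rw [if_pos h0, pvLoopA.eq_def]
    simp only [show ¬ 0 < num by omega, dif_neg, not_false_iff]
    norm_num
  · rw [if_neg h0]
    have hnum : 0 < num := by omega
    obtain ⟨h1, h2, h3, h4, h5⟩ := pvA_facts num hnum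
    have h9 : pvFdA num ≤ 9 := pvFdA_le9 num hnum
    have hrz : pvPA num = 0 → num - pvFdA num * 10 ^ (pvPA num).toNat = 0 := by
      intro h
      have ht : (pvPA num).toNat = 0 := by omega
      rw [ht] at h2 h3 ⊢
      simp only [pow_zero, mul_one] at h2 h3 ⊢
      omega
    have hexp : (pvFdA num + 1) * 10 ^ (pvPA num).toNat
        = pvFdA num * 10 ^ (pvPA num).toNat + 10 ^ (pvPA num).toNat := by ring
    have := pvAD (10 * (pvPA num).toNat + (pvFdA num).toNat) (pvPA num) (pvFdA num)
      (num - pvFdA num * 10 ^ (pvPA num).toNat) 0 h5 h1 h9 (by omega) (by omega) hrz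
      (le_refl _)
    rw [show pvFdA num * 10 ^ (pvPA num).toNat + (num - pvFdA num * 10 ^ (pvPA num).toNat)
      = num by ring] at this
    rw [this]
    rfl
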